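-- pv_equiv track=rewrite | github.com/mortyc126-debug/rayon | src/boundary_composition.py | compute_influence_vector
-- ===== SOURCE A (Python) =====
-- def compute_influence_vector(n, tt):
--     """Compute influence of each variable."""
--     total = 2**n
--     inf = [0] * n
--     for bits in range(total):
--         for j in range(n):
--             nb = bits ^ (1 << j)
--             if tt[bits] != tt[nb]:
--                 inf[j] += 1
--     # Each edge counted twice (from both endpoints)
--     return [i // 2 for i in inf]
-- ===== SOURCE B (Python) =====
-- def compute_influence_vector(n, tt):
--     """Compute influence of each variable."""
--     out = []
--     for j in range(n):
--         step = 1 << j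
--         blocks = 2**n // (2 * step)
--         cnt = 0
--         for hi in range(blocks):
--             base = hi * 2 * step
--             for lo in range(step):
--                 if tt[base + lo] != tt[base + lo + step]:
--                     cnt += 1
--         out.append(cnt)
--     return out
-- ===== Notes on version B (the rewrite author's own statement) =====
-- stated objective: alternative
-- what changed: Instead of scanning all 2^n points and testing every direction from both endpoints then halving each count, B iterates per variable j over the direction-j hypercube edges exactly once via a block/offset decomposition (no XOR, no parity correction) and builds the result list directly.
import Mathlib
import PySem

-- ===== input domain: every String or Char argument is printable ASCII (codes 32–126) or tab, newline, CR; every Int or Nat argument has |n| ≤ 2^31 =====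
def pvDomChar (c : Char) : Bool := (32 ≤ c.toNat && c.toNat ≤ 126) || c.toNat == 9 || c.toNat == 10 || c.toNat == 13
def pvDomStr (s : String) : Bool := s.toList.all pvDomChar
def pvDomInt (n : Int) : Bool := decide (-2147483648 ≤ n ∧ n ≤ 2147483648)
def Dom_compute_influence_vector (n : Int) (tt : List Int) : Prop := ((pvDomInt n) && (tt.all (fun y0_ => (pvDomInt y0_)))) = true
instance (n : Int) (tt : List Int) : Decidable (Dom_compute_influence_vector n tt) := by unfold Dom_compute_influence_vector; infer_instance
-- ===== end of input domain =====

-- B visits each direction-j hypercube edge once via a per-variable block/offset decomposition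
-- instead of scanning every point in every direction and halving; objective: alternative
-- (genuinely different traversal of the same edge set).

-- ===== PORT A =====
-- Literal port of A. Under Pre_: n ≥ 0 (so 2**n = 2^n.toNat), bits and j from range are
-- nonnegative (so Nat xor/shift are exact), and every index is in range, so comparing the
-- pyGet? options equals Python's tt[bits] != tt[nb].
def compute_influence_vector (n : Int) (tt : List Int) : List Int :=
  let total : Int := ((2:Nat) ^ n.toNat : Nat)
  let inf : List Int := List.replicate n.toNat 0
  let inf : List Int :=
    (PySem.List.pyRange 0 total 1).foldl (fun inf bits =>
      (PySem.List.pyRange 0 n 1).foldl (fun inf j =>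
        let nb : Int := ((bits.toNat ^^^ ((1:Nat) <<< j.toNat) : Nat) : Int)
        if PySem.List.pyGet? tt bits ≠ PySem.List.pyGet? tt nb then
          inf.set j.toNat (inf.getD j.toNat 0 + 1)
        else inf) inf) inf
  inf.map (fun i => PySem.Int.floordiv i 2)

-- ===== PORT B =====
-- Literal port of Source B (same conventions as the port of A).
def compute_influence_vector_alt (n : Int) (tt : List Int) : List Int :=
  (PySem.List.pyRange 0 n 1).map (fun j =>
    let step : Int := (((1:Nat) <<< j.toNat : Nat) : Int)
    let blocks : Int := PySem.Int.floordiv (((2:Nat) ^ n.toNat : Nat) : Int) (2 * step)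
    (PySem.List.pyRange 0 blocks 1).foldl (fun cnt hi =>
      let base : Int := hi * 2 * step
      (PySem.List.pyRange 0 step 1).foldl (fun cnt lo =>
        if PySem.List.pyGet? tt (base + lo) ≠ PySem.List.pyGet? tt (base + lo + step) then cnt + 1
        else cnt) cnt) 0)

-- ===== PRECONDITION & SPEC =====
-- Exactly where Python A returns: for n < 0, 2**n is a float and range raises TypeError; for
-- n ≥ 1 every index bits, nb < 2^n is accessed, so tt needs at least 2^n entries (else
-- IndexError); for n = 0 the inner loop is empty and tt is never indexed.
def Pre_compute_influence_vector (n : Int) (tt : List Int) : Prop :=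
  0 ≤ n ∧ (n = 0 ∨ (2:Nat) ^ n.toNat ≤ tt.length)
instance (n : Int) (tt : List Int) : Decidable (Pre_compute_influence_vector n tt) := by
  unfold Pre_compute_influence_vector; infer_instance
def pvWitness_compute_influence_vector : Int × List Int := (1, [0, 1])

def Spec_compute_influence_vector (n : Int) (tt : List Int) (out : List Int) : Prop :=
  out = compute_influence_vector_alt n tt
instance (n : Int) (tt : List Int) (out : List Int) : Decidable (Spec_compute_influence_vector n tt out) := by
  unfold Spec_compute_influence_vector; infer_instance

-- ===== CLAIM (what is proved, stated in full; the proofs are below) =====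
def Claim_equal_compute_influence_vector : Prop := ∀ (n : Int) (tt : List Int), Dom_compute_influence_vector n tt → Pre_compute_influence_vector n tt → Spec_compute_influence_vector n tt (compute_influence_vector n tt)

-- ===== LEMMAS AND PROOFS =====

-- indicator of a mismatch along direction j at point b, exactly as port A tests it
def pvChi (tt : List Int) (j b : Nat) : Int :=
  if PySem.List.pyGet? tt (b : Int) ≠ PySem.List.pyGet? tt (((b ^^^ 2 ^ j : Nat)) : Int) then 1
  else 0

-- B's mismatch indicator for block hi, offset lo, in direction j (Nat-indexed form)
def pvEdge (tt : List Int) (j hi lo : Nat) : Int :=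
  if PySem.List.pyGet? tt ((2 ^ (j + 1) * hi + lo : Nat) : Int)
     ≠ PySem.List.pyGet? tt ((2 ^ (j + 1) * hi + lo + 2 ^ j : Nat) : Int) then 1 else 0

-- sum of f over 0,…,k-1
def pvSumR (k : Nat) (f : Nat → Int) : Int := ((List.range k).map f).sum

theorem pvSumR_congr (k : Nat) (f g : Nat → Int) (h : ∀ i, i < k → f i = g i) :
    pvSumR k f = pvSumR k g := by
  unfold pvSumR
  rw [List.map_congr_left (fun i hi => h i (List.mem_range.mp hi))]

theorem pvSumR_add_range (a b : Nat) (f : Nat → Int) :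
    pvSumR (a + b) f = pvSumR a f + pvSumR b (fun r => f (a + r)) := by
  unfold pvSumR
  rw [List.range_add, List.map_append, List.sum_append, List.map_map]
  rfl

theorem pvSumR_succ (k : Nat) (f : Nat → Int) :
    pvSumR (k + 1) f = pvSumR k f + f k := by
  unfold pvSumR
  rw [List.range_succ, List.map_append, List.sum_append]
  simp

theorem pvSumR_mul (M K : Nat) (f : Nat → Int) :
    pvSumR (M * K) f = pvSumR M (fun i => pvSumR K (fun r => f (i * K + r))) := by
  induction M with
  | zero => simp [pvSumR]
  | succ M ih =>
    have e : (M + 1) * K = M * K + K := by ring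
    rw [e, pvSumR_add_range, ih, pvSumR_succ]

theorem pvSumR_add_fun (k : Nat) (f g : Nat → Int) :
    pvSumR k (fun i => f i + g i) = pvSumR k f + pvSumR k g := by
  unfold pvSumR
  exact List.sum_map_add

set_option maxRecDepth 10000 in
theorem pv_xor_add (hi lo j : Nat) (h : lo < 2 ^ j) :
    (2 ^ (j + 1) * hi + lo) ^^^ 2 ^ j = 2 ^ (j + 1) * hi + lo + 2 ^ j := by
  apply Nat.eq_of_testBit_eq
  intro k
  have h1 : lo < 2 ^ (j + 1) := lt_of_lt_of_le h (Nat.pow_le_pow_right (by norm_num) (by omega))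
  have h2 : lo + 2 ^ j < 2 ^ (j + 1) := by have := h; rw [pow_succ]; omega
  have e : 2 ^ (j + 1) * hi + lo + 2 ^ j = 2 ^ (j + 1) * hi + (lo + 2 ^ j) := by omega
  rw [Nat.testBit_xor, Nat.testBit_two_pow_mul_add hi h1, e, Nat.testBit_two_pow_mul_add hi h2,
      Nat.testBit_two_pow]
  by_cases hk : k < j + 1
  · simp only [hk, if_pos]
    have elo : lo + 2 ^ j = 2 ^ j * 1 + lo := by omega
    rw [elo, Nat.testBit_two_pow_mul_add 1 h]
    by_cases hkj : k < j
    · have hne : j ≠ k := by omega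
      simp [hkj, hne]
    · have hkj' : k = j := by omega
      subst hkj'
      have hfalse : lo.testBit k = false := Nat.testBit_lt_two_pow h
      simp [hfalse]
  · have hne : j ≠ k := by omega
    simp [hk, hne]

theorem pv_set_map_range (N m : Nat) (s : Nat → Int) (x : Int) (_hm : m < N) :
    ((List.range N).map s).set m x = (List.range N).map (fun j => if j = m then x else s j) := by
  apply List.ext_getElem
  · simp
  · intro i h1 h2
    simp only [List.getElem_set, List.getElem_map, List.getElem_range]
    by_cases h3 : m = i
    · subst h3; simp
    · rw [if_neg h3, if_neg (fun h => h3 h.symm)]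

theorem pv_getD_map_range (N m : Nat) (s : Nat → Int) (hm : m < N) :
    ((List.range N).map s).getD m 0 = s m := by
  rw [List.getD_eq_getElem?_getD, List.getElem?_map, List.getElem?_range hm]
  rfl

theorem pv_inner (c : Nat → Prop) [DecidablePred c] (N : Nat) (s : Nat → Int) (m : Nat)
    (hm : m ≤ N) :
    (List.range m).foldl (fun l j => if c j then l.set j (l.getD j 0 + 1) else l)
      ((List.range N).map s)
    = (List.range N).map (fun j => if j < m ∧ c j then s j + 1 else s j) := by
  induction m with
  | zero =>
    apply List.map_congr_left
    intro j _
    simp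
  | succ m ih =>
    rw [List.range_succ, List.foldl_append, ih (by omega)]
    simp only [List.foldl_cons, List.foldl_nil]
    by_cases hc : c m
    · rw [if_pos hc, pv_getD_map_range N m _ (by omega), pv_set_map_range N m _ _ (by omega)]
      apply List.map_congr_left
      intro j _
      by_cases hjm : j = m
      · subst hjm
        rw [if_pos rfl, if_neg (fun h => absurd h.1 (lt_irrefl j)),
            if_pos ⟨by omega, hc⟩]
      · have hiff : (j < m + 1 ∧ c j) = (j < m ∧ c j) := propext
          ⟨fun h => ⟨by omega, h.2⟩, fun h => ⟨by omega, h.2⟩⟩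
        rw [if_neg hjm]
        simp only [hiff]
    · rw [if_neg hc]
      apply List.map_congr_left
      intro j _
      by_cases hjm : j = m
      · subst hjm
        rw [if_neg (fun h => absurd h.1 (lt_irrefl j)), if_neg (fun h => absurd h.2 hc)]
      · have hiff : (j < m + 1 ∧ c j) = (j < m ∧ c j) := propext
          ⟨fun h => ⟨by omega, h.2⟩, fun h => ⟨by omega, h.2⟩⟩
        simp only [hiff]

theorem pv_outer (c : Nat → Nat → Prop) [inst : ∀ j b, Decidable (c j b)] (N : Nat)
    (bs : List Nat) (s : Nat → Int) :
    bs.foldl (fun l b =>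
        (List.range N).foldl (fun l j => if c j b then l.set j (l.getD j 0 + 1) else l) l)
      ((List.range N).map s)
    = (List.range N).map
        (fun j => s j + ((bs.map (fun b => if c j b then (1:Int) else 0)).sum)) := by
  induction bs generalizing s with
  | nil => simp
  | cons b bs ih =>
    simp only [List.foldl_cons]
    rw [pv_inner (fun j => c j b) N s N le_rfl, ih]
    apply List.map_congr_left
    intro j hj
    have hjN : j < N := List.mem_range.mp hj
    simp only [List.map_cons, List.sum_cons, hjN, true_and]
    by_cases hc : c j b <;> simp [hc] <;> ring

theorem pv_foldl_count (l : List Nat) (p : Nat → Prop) [DecidablePred p] (a : Int) :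
    l.foldl (fun acc x => if p x then acc + 1 else acc) a
    = a + ((l.map (fun x => if p x then (1:Int) else 0)).sum) := by
  induction l generalizing a with
  | nil => simp
  | cons x l ih =>
    simp only [List.foldl_cons, List.map_cons, List.sum_cons, ih]
    by_cases hp : p x <;> simp [hp] <;> ring

-- A computes, for each j, (Σ_{b<2^n} χ_j(b)) // 2
theorem pv_A_eq (n : Int) (tt : List Int) :
    compute_influence_vector n tt
    = (List.range n.toNat).map
        (fun j => PySem.Int.floordiv (pvSumR (2 ^ n.toNat) (pvChi tt j)) 2) := by
  unfold compute_influence_vector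
  dsimp only
  have hrep : List.replicate n.toNat (0:Int) = (List.range n.toNat).map (fun _ => 0) := by
    simp
  rw [hrep, PySem.List.pyRange_one 0 (((2:Nat) ^ n.toNat : Nat) : Int),
      PySem.List.pyRange_one 0 n]
  simp only [zero_add, Int.sub_zero, Int.toNat_natCast, List.foldl_map, Nat.one_shiftLeft]
  refine Eq.trans (congrArg (List.map (fun i => PySem.Int.floordiv i 2))
    (pv_outer (fun j b =>
        PySem.List.pyGet? tt (b : Int) ≠ PySem.List.pyGet? tt (((b ^^^ 2 ^ j : Nat)) : Int))
      n.toNat (List.range (2 ^ n.toNat)) (fun _ => 0))) ?_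
  rw [List.map_map]
  apply List.map_congr_left
  intro j _
  simp only [Function.comp_apply, pvSumR, zero_add]
  rfl

-- the inner two loops of B, characterised as the block/offset double sum
theorem pvB_fold (tt : List Int) (j M : Nat) :
    List.foldl (fun x (y : Nat) =>
        List.foldl (fun x (y1 : Nat) =>
            if PySem.List.pyGet? tt ((y : Int) * 2 * ((2 ^ j : Nat) : Int) + (y1 : Int))
               ≠ PySem.List.pyGet? tt
                   ((y : Int) * 2 * ((2 ^ j : Nat) : Int) + (y1 : Int) + ((2 ^ j : Nat) : Int))
            then x + 1 else x)
          x (List.range (2 ^ j)))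
      0 (List.range M)
    = pvSumR M (fun hi => pvSumR (2 ^ j) (pvEdge tt j hi)) := by
  induction M with
  | zero => simp [pvSumR]
  | succ M ih =>
    rw [List.range_succ, List.foldl_append, ih]
    simp only [List.foldl_cons, List.foldl_nil]
    rw [pv_foldl_count (List.range (2 ^ j))
        (fun y1 : Nat => PySem.List.pyGet? tt ((M : Int) * 2 * ((2 ^ j : Nat) : Int) + (y1 : Int))
          ≠ PySem.List.pyGet? tt
              ((M : Int) * 2 * ((2 ^ j : Nat) : Int) + (y1 : Int) + ((2 ^ j : Nat) : Int)))]
    rw [pvSumR_succ]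
    apply congrArg
    show _ = pvSumR (2 ^ j) (pvEdge tt j M)
    apply congrArg
    apply List.map_congr_left
    intro lo _
    have e1 : (M : Int) * 2 * (((2 ^ j : Nat)) : Int) + (lo : Int)
        = ((2 ^ (j + 1) * M + lo : Nat) : Int) := by
      push_cast [pow_succ]; ring
    have e2 : (M : Int) * 2 * (((2 ^ j : Nat)) : Int) + (lo : Int) + (((2 ^ j : Nat)) : Int)
        = ((2 ^ (j + 1) * M + lo + 2 ^ j : Nat) : Int) := by
      push_cast [pow_succ]; ring
    simp only [pvEdge]
    rw [e2, e1]

-- B computes, for each j, the double block/offset sum of the same mismatch indicator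
theorem pv_B_eq (n : Int) (tt : List Int) :
    compute_influence_vector_alt n tt
    = (List.range n.toNat).map (fun j =>
        pvSumR (2 ^ n.toNat / 2 ^ (j + 1)) (fun hi => pvSumR (2 ^ j) (pvEdge tt j hi))) := by
  unfold compute_influence_vector_alt
  dsimp only
  rw [PySem.List.pyRange_one 0 n]
  simp only [Int.sub_zero, List.map_map]
  apply List.map_congr_left
  intro j _
  simp only [Function.comp_apply, zero_add, Int.toNat_natCast, Nat.one_shiftLeft]
  have hb : (2 : Int) * (((2:Nat) ^ j : Nat) : Int) = (((2:Nat) ^ (j + 1) : Nat) : Int) := by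
    push_cast [pow_succ]; ring
  rw [hb, PySem.Int.floordiv_natCast,
      PySem.List.pyRange_one 0 (((2:Nat) ^ n.toNat / 2 ^ (j + 1) : Nat) : Int),
      PySem.List.pyRange_one 0 (((2:Nat) ^ j : Nat) : Int)]
  simp only [zero_add, Int.sub_zero, Int.toNat_natCast, List.foldl_map]
  exact pvB_fold tt j (2 ^ n.toNat / 2 ^ (j + 1))

-- the central identity: for j < N the full mismatch sum is twice the block sum, so the exact
-- halving of A gives B's per-variable edge count
theorem pv_key (tt : List Int) (N j : Nat) (hj : j < N) :
    PySem.Int.floordiv (pvSumR (2 ^ N) (pvChi tt j)) 2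
    = pvSumR (2 ^ N / 2 ^ (j + 1)) (fun hi => pvSumR (2 ^ j) (pvEdge tt j hi)) := by
  have hdvd : 2 ^ (j + 1) ∣ 2 ^ N := pow_dvd_pow 2 (by omega)
  have hMK : 2 ^ N / 2 ^ (j + 1) * 2 ^ (j + 1) = 2 ^ N := Nat.div_mul_cancel hdvd
  have hsplit : pvSumR (2 ^ N) (pvChi tt j)
      = 2 * pvSumR (2 ^ N / 2 ^ (j + 1)) (fun hi => pvSumR (2 ^ j) (pvEdge tt j hi)) := by
    conv_lhs => rw [← hMK]
    rw [pvSumR_mul]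
    have hpt : ∀ i, i < 2 ^ N / 2 ^ (j + 1) →
        pvSumR (2 ^ (j + 1)) (fun r => pvChi tt j (i * 2 ^ (j + 1) + r))
        = pvSumR (2 ^ j) (pvEdge tt j i) + pvSumR (2 ^ j) (pvEdge tt j i) := by
      intro i _
      have h2 : 2 ^ (j + 1) = 2 ^ j + 2 ^ j := by rw [pow_succ]; omega
      rw [h2, pvSumR_add_range]
      apply congrArg₂
      · apply pvSumR_congr
        intro lo hlo
        have hc : i * (2 ^ j + 2 ^ j) + lo = 2 ^ (j + 1) * i + lo := by rw [pow_succ]; ring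
        rw [hc]
        unfold pvChi pvEdge
        rw [pv_xor_add i lo j hlo]
      · apply pvSumR_congr
        intro lo hlo
        have hc : i * (2 ^ j + 2 ^ j) + (2 ^ j + lo) = (2 ^ (j + 1) * i + lo) + 2 ^ j := by
          rw [pow_succ]; ring
        rw [hc]
        unfold pvChi pvEdge
        have hx : ((2 ^ (j + 1) * i + lo) + 2 ^ j) ^^^ 2 ^ j = 2 ^ (j + 1) * i + lo := by
          rw [← pv_xor_add i lo j hlo, Nat.xor_xor_cancel_right]
        rw [hx]
        exact if_congr ne_comm rfl rfl
    rw [pvSumR_congr _ _ _ hpt, pvSumR_add_fun]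
    ring
  rw [hsplit, PySem.Int.floordiv_eq_ediv_of_pos (by norm_num)]
  omega

-- ===== VERDICT (by name: the statement is the Claim_ definition above) =====
theorem compute_influence_vector_spec : Claim_equal_compute_influence_vector := by
  intro n tt _hdom _hpre
  unfold Spec_compute_influence_vector
  rw [pv_A_eq, pv_B_eq]
  apply List.map_congr_left
  intro j hj
  exact pv_key tt n.toNat j (List.mem_range.mp hj)
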